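-- pv_equiv track=rewrite | github.com/john91002004/Python-Basic-Course | python_homework.py | generateNxMComplexTableText
-- ===== SOURCE A (Python) =====
-- def generateNxMComplexTableText(N:int, M:int):
--     tmp_list = []
--     complex_arr = generateNxMComplexArray(N, M)
--     string_arr = convertComplexArrayElementTypeToString(complex_arr)
--     for item in string_arr:
--         line = ' '.join(item)
--         tmp_list.append(line)
--     return '\n'.join(tmp_list)
--
-- def convertComplexArrayElementTypeToString(arr):
--     for i in range( len(arr) ):
--         for j in range( len(arr[i]) ):
--             arr[i][j] = str(arr[i][j])
--     return arr
--
-- def generateNxMComplexArray(N:int, M:int):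
--     arr = []
--     for a in range(N+1):
--         arr.append([])
--         for b in range(M+1):
--             complexNum = complex(a, b)
--             arr[a].append(complexNum)
--     return arr
-- ===== SOURCE B (Python) =====
-- def generateNxMComplexTableText(N: int, M: int):
--     # Assemble each row with one join over precomputed column-digit strings and a
--     # composite separator; no complex numbers or per-cell str(complex) calls.
--     if N < 0:
--         return ''
--     bs = [str(b) for b in range(M + 1)]
--     row0 = ('j '.join(bs) + 'j') if bs else ''
--     rows = [row0]
--     for a in range(1, N + 1):
--         sa = str(a)
--         rows.append(('(' + sa + '+' + ('j) (' + sa + '+').join(bs) + 'j)') if bs else '')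
--     return '\n'.join(rows)
-- ===== Notes on version B (the rewrite author's own statement) =====
-- stated objective: faster
-- what changed: B never builds complex numbers or a 2-D array: it precomputes the decimal strings of the column indices once, emits the first row by joining them with separator 'j ', and assembles every other row with a single join over that same precomputed list using the composite separator 'j) ('+str(a)+'+', exploiting the regular shape of str(complex(a,b)).
import Mathlib
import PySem

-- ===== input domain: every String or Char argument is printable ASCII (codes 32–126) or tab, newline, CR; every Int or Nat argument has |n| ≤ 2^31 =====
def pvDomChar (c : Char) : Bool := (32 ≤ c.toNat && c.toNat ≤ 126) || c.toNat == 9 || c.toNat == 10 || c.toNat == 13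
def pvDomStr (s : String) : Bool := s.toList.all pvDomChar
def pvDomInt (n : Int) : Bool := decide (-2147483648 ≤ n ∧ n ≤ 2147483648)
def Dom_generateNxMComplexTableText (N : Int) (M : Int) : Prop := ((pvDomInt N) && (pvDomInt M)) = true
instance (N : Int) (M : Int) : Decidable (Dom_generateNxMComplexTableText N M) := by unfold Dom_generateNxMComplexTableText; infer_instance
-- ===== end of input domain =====

-- B drops the complex array entirely and assembles each row by one join over precomputed
-- column-digit strings with a composite separator; objective: alternative formulation.

-- str(complex(a, b)) for 0 ≤ a, b (the only values produced here): '0j'-style when the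
-- real part is 0, '(a+bj)' otherwise; exact on nonnegative integers ≤ 2^31 (floats are exact there).
def pvComplexStr (a b : Int) : String :=
  if a = 0 then PySem.Int.toStr b ++ "j"
  else "(" ++ PySem.Int.toStr a ++ "+" ++ PySem.Int.toStr b ++ "j)"

-- ===== PORT A =====
def generateNxMComplexArray (N : Int) (M : Int) : List (List (Int × Int)) :=
  (PySem.List.pyRange 0 (N + 1) 1).foldl (fun arr a =>
    let arr := arr ++ [[]]
    (PySem.List.pyRange 0 (M + 1) 1).foldl (fun arr b =>
      -- arr[a].append(complex(a, b))
      arr.set a.toNat (PySem.List.pyGetD arr a [] ++ [(a, b)])) arr) []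

-- Python mutates arr[i][j] := str(arr[i][j]) at every index of the rectangular table; since the
-- element type changes, the index loops are ported as the elementwise map (exact: every cell visited once).
def convertComplexArrayElementTypeToString (arr : List (List (Int × Int))) : List (List String) :=
  arr.map (fun row => row.map (fun c => pvComplexStr c.1 c.2))

def generateNxMComplexTableText (N : Int) (M : Int) : String :=
  let complex_arr := generateNxMComplexArray N M
  let string_arr := convertComplexArrayElementTypeToString complex_arr
  let tmp_list := string_arr.foldl (fun tmp item => tmp ++ [PySem.Str.join " " item]) []
  PySem.Str.join "\n" tmp_list

-- ===== PORT B =====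
def generateNxMComplexTableText_alt (N : Int) (M : Int) : String :=
  if N < 0 then "" else
    let bs := (PySem.List.pyRange 0 (M + 1) 1).map PySem.Int.toStr
    let row0 := if bs = [] then "" else PySem.Str.join "j " bs ++ "j"
    let rows := (PySem.List.pyRange 1 (N + 1) 1).foldl (fun rows a =>
      let sa := PySem.Int.toStr a
      rows ++ [if bs = [] then ""
               else "(" ++ sa ++ "+" ++ PySem.Str.join ("j) (" ++ sa ++ "+") bs ++ "j)"]) [row0]
    PySem.Str.join "\n" rows

-- ===== PRECONDITION & SPEC =====
def Spec_generateNxMComplexTableText (N : Int) (M : Int) (out : String) : Prop := out = generateNxMComplexTableText_alt N M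
instance (N : Int) (M : Int) (out : String) : Decidable (Spec_generateNxMComplexTableText N M out) := by unfold Spec_generateNxMComplexTableText; infer_instance

-- ===== CLAIM (what is proved, stated in full; the proofs are below) =====
def Claim_equal_generateNxMComplexTableText : Prop := ∀ (N : Int) (M : Int), Dom_generateNxMComplexTableText N M → Spec_generateNxMComplexTableText N M (generateNxMComplexTableText N M)

-- ===== LEMMAS AND PROOFS =====

-- the inner loop of generateNxMComplexArray only ever extends the last row
lemma inner_loop_eq (a : Int) (rows : List (List (Int × Int))) (cur : List (Int × Int))
    (bs : List Int) (ha : a.toNat = rows.length) (ha0 : 0 ≤ a) :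
    bs.foldl (fun arr b => arr.set a.toNat (PySem.List.pyGetD arr a [] ++ [(a, b)]))
      (rows ++ [cur]) = rows ++ [cur ++ bs.map (fun b => (a, b))] := by
  induction bs generalizing cur with
  | nil => simp
  | cons b bs ih =>
    have hget : PySem.List.pyGetD (rows ++ [cur]) a [] = cur := by
      obtain ⟨k, rfl⟩ := Int.eq_ofNat_of_zero_le ha0
      have hk : k = rows.length := by simpa using ha
      rw [PySem.List.pyGetD_natCast, hk]
      simp [List.getD]
    have hset : (rows ++ [cur]).set a.toNat (cur ++ [(a, b)]) = rows ++ [cur ++ [(a, b)]] := by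
      rw [ha, List.set_append_right _ _ (le_refl _)]
      simp
    simp only [List.foldl_cons, hget, hset, ih (cur ++ [(a, b)])]
    simp

-- the outer loop builds the rows of the table, one per a
lemma outer_loop_eq (M : Int) (n : ℕ) : ∀ (a0 : Int) (rows : List (List (Int × Int))),
    0 ≤ a0 → a0.toNat = rows.length → n = (a0 + n - a0).toNat →
    (PySem.List.pyRange a0 (a0 + n) 1).foldl (fun arr a =>
        let arr := arr ++ [[]]
        (PySem.List.pyRange 0 (M + 1) 1).foldl (fun arr b =>
          arr.set a.toNat (PySem.List.pyGetD arr a [] ++ [(a, b)])) arr) rows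
      = rows ++ (PySem.List.pyRange a0 (a0 + n) 1).map (fun a =>
          (PySem.List.pyRange 0 (M + 1) 1).map (fun b => (a, b))) := by
  induction n with
  | zero =>
    intro a0 rows _ _ _
    simp only [Nat.cast_zero, add_zero]
    rw [PySem.List.pyRange_one_eq_nil le_rfl]
    simp
  | succ n ih =>
    intro a0 rows h0 hlen _
    have hcons : PySem.List.pyRange a0 (a0 + (n + 1 : ℕ)) 1
        = a0 :: PySem.List.pyRange (a0 + 1) (a0 + (n + 1 : ℕ)) 1 :=
      PySem.List.pyRange_one_cons (by push_cast; omega)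
    have hstep : (PySem.List.pyRange 0 (M + 1) 1).foldl (fun arr b =>
          arr.set a0.toNat (PySem.List.pyGetD arr a0 [] ++ [(a0, b)])) (rows ++ [[]])
        = rows ++ [(PySem.List.pyRange 0 (M + 1) 1).map (fun b => (a0, b))] := by
      rw [inner_loop_eq a0 rows [] _ hlen h0]; simp
    have harith : (a0 : Int) + (n + 1 : ℕ) = (a0 + 1) + n := by push_cast; ring
    rw [hcons]
    simp only [List.foldl_cons, List.map_cons, hstep]
    rw [harith, ih (a0 + 1) (rows ++ [(PySem.List.pyRange 0 (M + 1) 1).map (fun b => (a0, b))])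
      (by omega) (by simp; omega) (by omega)]
    simp

lemma array_eq (N M : Int) : generateNxMComplexArray N M
    = (PySem.List.pyRange 0 (N + 1) 1).map (fun a =>
        (PySem.List.pyRange 0 (M + 1) 1).map (fun b => (a, b))) := by
  unfold generateNxMComplexArray
  by_cases h : 0 ≤ N + 1
  · have : N + 1 = (0 : Int) + (N + 1).toNat := by omega
    rw [this, outer_loop_eq M (N + 1).toNat 0 [] (le_refl 0) rfl (by omega)]
    simp
  · rw [PySem.List.pyRange_one_eq_nil (show (N : Int) + 1 ≤ 0 by omega)]
    simp

-- A as a flat join of per-a row strings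
lemma a_eq_rows (N M : Int) : generateNxMComplexTableText N M
    = PySem.Str.join "\n" ((PySem.List.pyRange 0 (N + 1) 1).map (fun a =>
        PySem.Str.join " " ((PySem.List.pyRange 0 (M + 1) 1).map (fun b => pvComplexStr a b)))) := by
  unfold generateNxMComplexTableText convertComplexArrayElementTypeToString
  rw [array_eq]
  simp only [PySem.List.foldl_append_singleton_eq_map, List.nil_append, List.map_map]
  simp [Function.comp_def]

-- joining items 'P ++ s ++ Q' with sep = joining the s with the composite separator 'Q ++ sep ++ P'
lemma chars_join_affix (sep P Q : List Char) (bs : List (List Char)) (h : bs ≠ []) :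
    PySem.Chars.join sep (bs.map (fun s => P ++ s ++ Q))
      = P ++ PySem.Chars.join (Q ++ sep ++ P) bs ++ Q := by
  induction bs with
  | nil => exact absurd rfl h
  | cons x rest ih =>
    cases rest with
    | nil => simp [PySem.Chars.join_singleton]
    | cons y rest' =>
      have htail : PySem.Chars.join sep ((P ++ y ++ Q) :: rest'.map (fun s => P ++ s ++ Q))
          = P ++ PySem.Chars.join (Q ++ sep ++ P) (y :: rest') ++ Q := by
        simpa using ih (by simp)
      rw [List.map_cons, List.map_cons, PySem.Chars.join_cons_cons, htail,
        PySem.Chars.join_cons_cons (Q ++ sep ++ P) x y]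
      simp

lemma str_join_affix (sep P Q : String) (bs : List String) (h : bs ≠ []) :
    PySem.Str.join sep (bs.map (fun s => P ++ s ++ Q))
      = P ++ PySem.Str.join (Q ++ sep ++ P) bs ++ Q := by
  apply String.toList_inj.mp
  simp only [String.toList_append, PySem.Str.toList_join, List.map_map, Function.comp_def,
    String.toList_append]
  rw [show (List.map (fun x => P.toList ++ x.toList ++ Q.toList) bs)
        = (bs.map String.toList).map (fun l => P.toList ++ l ++ Q.toList) by
      simp [List.map_map, Function.comp_def]]
  exact chars_join_affix _ _ _ _ (by simpa using h)

-- a nonzero row of A equals B's composite-separator join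
lemma row_eq (a M : Int) (ha : a ≠ 0) (hM : 0 ≤ M) :
    PySem.Str.join " " ((PySem.List.pyRange 0 (M + 1) 1).map (fun b => pvComplexStr a b))
      = "(" ++ PySem.Int.toStr a ++ "+"
        ++ PySem.Str.join ("j) (" ++ PySem.Int.toStr a ++ "+")
            ((PySem.List.pyRange 0 (M + 1) 1).map PySem.Int.toStr) ++ "j)" := by
  have hne : (PySem.List.pyRange 0 (M + 1) 1).map PySem.Int.toStr ≠ [] := by
    rw [PySem.List.pyRange_one_cons (by omega)]; simp
  have hmap : (PySem.List.pyRange 0 (M + 1) 1).map (fun b => pvComplexStr a b)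
      = ((PySem.List.pyRange 0 (M + 1) 1).map PySem.Int.toStr).map
          (fun s => ("(" ++ PySem.Int.toStr a ++ "+") ++ s ++ "j)") := by
    simp only [List.map_map, Function.comp_def]
    refine List.map_congr_left (fun b _ => ?_)
    simp [pvComplexStr, ha]
  rw [hmap, str_join_affix _ _ _ _ hne]
  have hsep : ("j)" : String) ++ " " ++ ("(" ++ PySem.Int.toStr a ++ "+")
      = "j) (" ++ PySem.Int.toStr a ++ "+" := by
    apply String.toList_inj.mp
    simp [String.toList_append]
  rw [hsep]

-- row zero of A equals B's 'j '-join
lemma row_zero_eq (M : Int) (hM : 0 ≤ M) :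
    PySem.Str.join " " ((PySem.List.pyRange 0 (M + 1) 1).map (fun b => pvComplexStr 0 b))
      = PySem.Str.join "j " ((PySem.List.pyRange 0 (M + 1) 1).map PySem.Int.toStr) ++ "j" := by
  have hne : (PySem.List.pyRange 0 (M + 1) 1).map PySem.Int.toStr ≠ [] := by
    rw [PySem.List.pyRange_one_cons (by omega)]; simp
  have hmap : (PySem.List.pyRange 0 (M + 1) 1).map (fun b => pvComplexStr 0 b)
      = ((PySem.List.pyRange 0 (M + 1) 1).map PySem.Int.toStr).map
          (fun s => ("" : String) ++ s ++ "j") := by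
    simp [List.map_map, Function.comp_def, pvComplexStr]
  rw [hmap, str_join_affix _ _ _ _ hne]
  have hsep : ("j" : String) ++ " " ++ "" = "j " := by
    apply String.toList_inj.mp
    simp
  rw [hsep]
  apply String.toList_inj.mp
  simp

lemma join_empty (sep : String) : PySem.Str.join sep ([] : List String) = "" := by
  apply String.toList_inj.mp
  simp [PySem.Str.toList_join, PySem.Chars.join_nil]

-- ===== VERDICT (by name: the statement is the Claim_ definition above) =====
theorem generateNxMComplexTableText_spec : Claim_equal_generateNxMComplexTableText := by
  intro N M _
  unfold Spec_generateNxMComplexTableText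
  rw [a_eq_rows]
  simp only [generateNxMComplexTableText_alt]
  by_cases hN : N < 0
  · rw [if_pos hN, PySem.List.pyRange_one_eq_nil (show N + 1 ≤ 0 by omega)]
    simp [join_empty]
  · rw [if_neg hN]
    simp only [PySem.List.foldl_append_singleton_eq_map]
    congr 1
    rw [PySem.List.pyRange_one_cons (show (0 : Int) < N + 1 by omega), List.map_cons]
    by_cases hM : (0 : Int) ≤ M
    · have hbs : (PySem.List.pyRange 0 (M + 1) 1).map PySem.Int.toStr ≠ [] := by
        rw [PySem.List.pyRange_one_cons (by omega)]; simp
      rw [if_neg hbs, row_zero_eq M hM]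
      congr 1
      refine List.map_congr_left (fun a hamem => ?_)
      have ha1 : 1 ≤ a := (PySem.List.mem_pyRange_one.mp hamem).1
      rw [if_neg hbs, row_eq a M (by omega) hM]
    · have hbs : (PySem.List.pyRange 0 (M + 1) 1).map PySem.Int.toStr = [] := by
        rw [PySem.List.pyRange_one_eq_nil (by omega)]; simp
      rw [if_pos hbs, PySem.List.pyRange_one_eq_nil (show M + 1 ≤ 0 by omega)]
      simp only [List.map_nil, join_empty]
      congr 1
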